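-- pv_equiv track=rewrite | github.com/JavierPalomares90/spellchecker | norvig/norvig.py | get_casefold_dictionary
-- ===== SOURCE A (Python) =====
-- def get_casefold_dictionary(dictionary_terms):
--     terms = dict()
--     # iterate over all the dictionary
--     for term in dictionary_terms:
--         # casefold key
--         key = term.casefold()
--
--         # if the key is not in the map, add the term as a new list
--         if key not in terms:
--             value = [term]
--             terms[key] = value
--
--         else:
--             # add it to the list
--             values_list = terms[key]
--             values_list.append(term)
--             terms[key] = values_list
--     return terms
-- ===== SOURCE B (Python) =====
-- def get_casefold_dictionary(dictionary_terms):
--     # two passes: distinct casefold keys in first-seen order, then one comprehension per key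
--     keys = list(dict.fromkeys(t.casefold() for t in dictionary_terms))
--     return {k: [t for t in dictionary_terms if t.casefold() == k] for k in keys}
-- ===== Notes on version B (the rewrite author's own statement) =====
-- stated objective: simpler
-- what changed: Replaces the incremental dict-of-appending-lists loop by a two-pass formulation: first the distinct casefold keys in first-seen order (dict.fromkeys), then one dict comprehension collecting each key's terms by a filter.
import Mathlib
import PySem

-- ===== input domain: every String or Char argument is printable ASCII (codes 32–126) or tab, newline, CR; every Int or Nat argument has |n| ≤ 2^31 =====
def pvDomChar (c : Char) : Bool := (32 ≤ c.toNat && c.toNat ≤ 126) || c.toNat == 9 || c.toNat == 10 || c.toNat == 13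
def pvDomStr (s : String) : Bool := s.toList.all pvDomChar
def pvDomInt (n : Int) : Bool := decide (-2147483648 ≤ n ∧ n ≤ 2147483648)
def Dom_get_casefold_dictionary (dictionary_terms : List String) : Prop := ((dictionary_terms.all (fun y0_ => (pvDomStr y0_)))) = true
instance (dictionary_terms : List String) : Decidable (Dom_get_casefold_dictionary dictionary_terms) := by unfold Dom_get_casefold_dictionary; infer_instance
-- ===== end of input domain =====

-- B replaces A's incremental dict-of-lists loop by a two-pass keys-then-filter formulation (objective: simpler).
-- str.casefold is ported as PySem.Str.lower: exact on the ASCII domain Dom_ (casefold = lower there).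

-- ===== PORT A =====
def get_casefold_dictionary (dictionary_terms : List String) : List (String × List String) :=
  (dictionary_terms.foldl (fun terms term =>
    let key := PySem.Str.lower term
    if terms.contains key = false then
      terms.insert key [term]
    else
      terms.insert key (terms.getD key [] ++ [term]))
    (PySem.Dict.empty : PySem.Dict String (List String))).items

-- ===== PORT B =====
def get_casefold_dictionary_alt (dictionary_terms : List String) : List (String × List String) :=
  let keys := PySem.List.dedup (dictionary_terms.map PySem.Str.lower)
  keys.map (fun k => (k, dictionary_terms.filter (fun t => PySem.Str.lower t == k)))

-- ===== PRECONDITION & SPEC =====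
def Spec_get_casefold_dictionary (dictionary_terms : List String) (out : List (String × List String)) : Prop := out = get_casefold_dictionary_alt dictionary_terms
instance (dictionary_terms : List String) (out : List (String × List String)) : Decidable (Spec_get_casefold_dictionary dictionary_terms out) := by unfold Spec_get_casefold_dictionary; infer_instance

-- ===== CLAIM (what is proved, stated in full; the proofs are below) =====
def Claim_equal_get_casefold_dictionary : Prop := ∀ (dictionary_terms : List String), Dom_get_casefold_dictionary dictionary_terms → Spec_get_casefold_dictionary dictionary_terms (get_casefold_dictionary dictionary_terms)

-- ===== LEMMAS AND PROOFS =====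

-- A's branching loop body is exactly Python's d.modify key [] (· ++ [term]):
lemma step_eq_modify (d : PySem.Dict String (List String)) (t : String) :
    (if d.contains (PySem.Str.lower t) = false then
       d.insert (PySem.Str.lower t) [t]
     else
       d.insert (PySem.Str.lower t) (d.getD (PySem.Str.lower t) [] ++ [t]))
    = d.modify (PySem.Str.lower t) [] (· ++ [t]) := by
  by_cases h : d.contains (PySem.Str.lower t) = false
  · simp [h, PySem.Dict.modify, PySem.Dict.getD_of_not_contains _ _ h]
  · simp [h, PySem.Dict.modify]


-- ===== VERDICT (by name: the statement is the Claim_ definition above) =====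
theorem get_casefold_dictionary_spec : Claim_equal_get_casefold_dictionary := by
  intro l _
  unfold Spec_get_casefold_dictionary get_casefold_dictionary get_casefold_dictionary_alt
  have hb : (fun (terms : PySem.Dict String (List String)) (term : String) =>
      let key := PySem.Str.lower term
      if terms.contains key = false then terms.insert key [term]
      else terms.insert key (terms.getD key [] ++ [term]))
      = fun terms term => terms.modify (PySem.Str.lower term) [] (· ++ [term]) := by
    funext d t
    exact step_eq_modify d t
  rw [hb]
  set D := l.foldl (fun d t => d.modify (PySem.Str.lower t) [] (· ++ [t])) PySem.Dict.empty with hD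
  have hkeys : D.keys = PySem.Set.ofList (l.map PySem.Str.lower) := by
    rw [hD, PySem.Dict.keys_foldl_modify_key l PySem.Str.lower [] (fun _ t v => v ++ [t])]
    simp [PySem.Set.update_nil_left, PySem.Dict.keys_empty]
  have hnd : D.keys.Nodup := by
    rw [hkeys]; exact PySem.Set.nodup_ofList _
  have hget : ∀ k, D.getD k [] = l.filter (fun t => PySem.Str.lower t == k) := by
    intro k
    have := PySem.Dict.getD_foldl_modify_append (l.map (fun t => (PySem.Str.lower t, t)))
      (PySem.Dict.empty : PySem.Dict String (List String)) k
    rw [List.foldl_map] at this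
    rw [hD]
    simpa [List.filter_map, Function.comp_def] using this
  rw [PySem.Dict.items_eq_map_keys D hnd [], hkeys, PySem.List.dedup_eq_ofList]
  exact List.map_congr_left (fun k _ => by rw [hget k])
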